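-- pv_equiv track=rewrite | github.com/ilovelogic/Pauli-Path-Method | Lemma_8/pauli_operator.py | list_allocs
-- ===== SOURCE A (Python) =====
-- def list_allocs(num_p:int, num_w:int):
--     if (num_p > num_w):
--         return [] # No way to have num_p gates with non-identity I/O unless
--         # we have at least num_p Hamming weight to spread across the gates
--
--     list_alloc = [[0 for _ in range(num_w+1)] for _ in range(num_p+1)]
--
--     # Base cases
--     for w in range(1, num_w+1):
--         list_alloc[0][w] = 0 # No positions to fill but positive weight -> no way to have a layer
--     list_alloc[0][0] = 1
--
--     for i in range(1, num_p+1):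
--         for j in range(1,num_w+1):   #     IR                     RI                     RR
--             if (j > i):
--                 list_alloc[i][j] = list_alloc[i-1][j-1] + list_alloc[i-1][j-1] + list_alloc[i-1][j-2]
--             else: # Can use only one non-identity Pauli per gate
--                 list_alloc[i][j] = list_alloc[i-1][j-1] + list_alloc[i-1][j-1]
--
--     return list_alloc
-- ===== SOURCE B (Python) =====
-- def list_allocs(num_p: int, num_w: int):
--     # Closed-form fill: row i holds the coefficients of (2x + x^2)^i, i.e.
--     # cell (i, i+r) = C(i, r) * 2^(i-r) for 0 <= r <= min(i, num_w - i), all other cells 0.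
--     # Each row is computed directly from i by a running product; no row depends on another.
--     if num_p > num_w:
--         return []
--     rows = []
--     for i in range(num_p + 1):
--         row = [0] * (num_w + 1)
--         c = 1
--         for r in range(min(i, num_w - i) + 1):
--             row[i + r] = c << (i - r)
--             c = c * (i - r) // (r + 1)
--         rows.append(row)
--     return rows
-- ===== Notes on version B (the rewrite author's own statement) =====
-- stated objective: alternative
-- what changed: Replaces the row-by-row DP recurrence with a direct closed-form fill: row i holds the coefficients of (2x+x^2)^i, written as C(i,r)*2^(i-r) at column i+r via a running binomial product, so no cell is derived from a previous row.
import Mathlib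
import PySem

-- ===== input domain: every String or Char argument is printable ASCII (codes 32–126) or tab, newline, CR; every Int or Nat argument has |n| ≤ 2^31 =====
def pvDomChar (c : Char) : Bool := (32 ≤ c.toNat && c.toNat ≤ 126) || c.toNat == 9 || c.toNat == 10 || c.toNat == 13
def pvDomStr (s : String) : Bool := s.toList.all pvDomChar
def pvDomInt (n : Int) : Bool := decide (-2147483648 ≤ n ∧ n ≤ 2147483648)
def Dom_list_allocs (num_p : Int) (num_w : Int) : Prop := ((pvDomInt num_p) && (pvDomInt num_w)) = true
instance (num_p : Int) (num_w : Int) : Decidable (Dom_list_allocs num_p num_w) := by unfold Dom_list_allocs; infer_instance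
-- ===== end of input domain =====

-- B replaces the row-by-row DP recurrence with a direct closed-form fill: row i holds the
-- coefficients of (2x+x^2)^i, i.e. C(i,r)*2^(i-r) at column i+r, so no row is derived from another.

-- ===== PORT A =====
-- t[i][j] read / write with Python index semantics (all indices used are in range under Pre_)
def pvGet2 (t : List (List Int)) (i j : Int) : Int :=
  PySem.List.pyGetD (PySem.List.pyGetD t i []) j 0

def pvSet2 (t : List (List Int)) (i j : Int) (v : Int) : List (List Int) :=
  PySem.List.pySetD t i (PySem.List.pySetD (PySem.List.pyGetD t i []) j v)

def list_allocs (num_p : Int) (num_w : Int) : List (List Int) :=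
  if num_p > num_w then []
  else
    -- list_alloc = [[0 …] …]
    let t0 : List (List Int) :=
      (PySem.List.pyRange 0 (num_p+1) 1).map (fun _ =>
        (PySem.List.pyRange 0 (num_w+1) 1).map (fun _ => (0:Int)))
    -- base cases
    let t1 := (PySem.List.pyRange 1 (num_w+1) 1).foldl (fun t w => pvSet2 t 0 w 0) t0
    let t2 := pvSet2 t1 0 0 1
    -- main double loop
    (PySem.List.pyRange 1 (num_p+1) 1).foldl (fun t i =>
      (PySem.List.pyRange 1 (num_w+1) 1).foldl (fun t j =>
        if j > i then
          pvSet2 t i j (pvGet2 t (i-1) (j-1) + pvGet2 t (i-1) (j-1) + pvGet2 t (i-1) (j-2))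
        else
          pvSet2 t i j (pvGet2 t (i-1) (j-1) + pvGet2 t (i-1) (j-1))) t) t2

-- ===== PORT B =====
def list_allocs_alt (num_p : Int) (num_w : Int) : List (List Int) :=
  if num_p > num_w then []
  else
    (PySem.List.pyRange 0 (num_p+1) 1).foldl (fun rows i =>
      let res := (PySem.List.pyRange 0 (min i (num_w - i) + 1) 1).foldl
        (fun (st : List Int × Int) r =>
          -- row[i + r] = c << (i - r); the shift is ported as * 2^(i-r), exact since 0 ≤ i - r here
          (PySem.List.pySetD st.1 (i + r) (st.2 * 2 ^ (i - r).toNat),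
           -- c = c * (i - r) // (r + 1)
           PySem.Int.floordiv (st.2 * (i - r)) (r + 1)))
        (PySem.List.pyRepeat [0] (num_w + 1), 1)
      rows ++ [res.1]) []

-- ===== PRECONDITION & SPEC =====
-- Pre_ excludes exactly the inputs where A raises IndexError: num_p < 0 with num_p ≤ num_w
-- (the table is empty, yet A writes list_alloc[0][0]).
def Pre_list_allocs (num_p : Int) (num_w : Int) : Prop := num_w < num_p ∨ 0 ≤ num_p
instance (num_p : Int) (num_w : Int) : Decidable (Pre_list_allocs num_p num_w) := by unfold Pre_list_allocs; infer_instance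
def pvWitness_list_allocs : Int × Int := (2, 3)

def Spec_list_allocs (num_p : Int) (num_w : Int) (out : List (List Int)) : Prop := out = list_allocs_alt num_p num_w
instance (num_p : Int) (num_w : Int) (out : List (List Int)) : Decidable (Spec_list_allocs num_p num_w out) := by unfold Spec_list_allocs; infer_instance

-- ===== CLAIM (what is proved, stated in full; the proofs are below) =====
def Claim_equal_list_allocs : Prop := ∀ (num_p : Int) (num_w : Int), Dom_list_allocs num_p num_w → Pre_list_allocs num_p num_w → Spec_list_allocs num_p num_w (list_allocs num_p num_w)

-- ===== LEMMAS AND PROOFS =====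

def pvG (i j : Nat) : Int := if i ≤ j ∧ j ≤ 2*i then ((i.choose (j-i)) : Int) * 2 ^ (2*i - j) else 0

def pvRow (W i : Nat) : List Int := (List.range (W+1)).map (fun j => pvG i j)

def pvT (P W n : Nat) : List (List Int) :=
  (List.range (P+1)).map (fun i' => if i' ≤ n then pvRow W i' else List.replicate (W+1) 0)

def pvTin (P W i m : Nat) : List (List Int) :=
  (List.range (P+1)).map (fun i' =>
    if i' < i then pvRow W i'
    else if i' = i then (List.range (W+1)).map (fun j => if j ≤ m then pvG i j else 0)
    else List.replicate (W+1) 0)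

theorem pvComb_step (i m : Nat) (h : m ≤ i) :
    PySem.Int.floordiv ((i.choose m : Int) * ((i : Int) - m)) ((m : Int)+1)
      = (i.choose (m+1) : Int) := by
  have hc : (i.choose m : Int) * ((i:Int) - m) = (i.choose (m+1) : Int) * ((m:Int)+1) := by
    have h2 : i.choose m * (i - m) = i.choose (m+1) * (m+1) := by
      have := Nat.choose_succ_right_eq i m
      omega
    have h3 : ((i:Int) - m) = ((i - m : Nat) : Int) := by omega
    rw [h3, ← Nat.cast_mul, h2]; push_cast; ring
  rw [hc, PySem.Int.floordiv_eq_ediv_of_pos (by positivity), Int.mul_ediv_cancel _ (by positivity)]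

theorem pvG_rec_le (a b : Nat) (h : b ≤ a) :
    pvG (a+1) (b+1) = pvG a b + pvG a b := by
  unfold pvG
  by_cases h1 : a + 1 ≤ b + 1 ∧ b + 1 ≤ 2*(a+1)
  · rw [if_pos h1, if_pos ⟨by omega, by omega⟩]
    have : (b+1) - (a+1) = b - a := by omega
    rw [this, show b - a = 0 by omega, show 2*(a+1)-(b+1) = (2*a-b)+1 by omega]
    simp [pow_succ]; ring
  · rw [if_neg h1, if_neg (by omega)]; ring

theorem pvG_rec_gt (a b : Nat) (h : a < b) :
    pvG (a+1) (b+1) = pvG a b + pvG a b + pvG a (b-1) := by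
  unfold pvG
  by_cases hB : b ≤ 2*a
  · -- all three guards of interest hold
    rw [if_pos ⟨by omega, by omega⟩, if_pos ⟨by omega, by omega⟩, if_pos ⟨by omega, by omega⟩]
    rw [show (b+1) - (a+1) = (b-a-1)+1 by omega,
        Nat.choose_succ_succ' a (b-a-1),
        show (b-a-1)+1 = b-a by omega,
        show b-1-a = b-a-1 by omega,
        show 2*a - (b-1) = (2*a-b)+1 by omega,
        show 2*(a+1) - (b+1) = (2*a-b)+1 by omega]
    push_cast [pow_succ]; ring
  · by_cases hC : b = 2*a+1
    · rw [if_pos ⟨by omega, by omega⟩, if_neg (by omega), if_pos ⟨by omega, by omega⟩]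
      rw [show (b+1)-(a+1) = a+1 by omega, show b-1-a = a by omega,
          show 2*(a+1)-(b+1) = 0 by omega, show 2*a-(b-1) = 0 by omega]
      simp [Nat.choose_self]
    · rw [if_neg (by omega), if_neg (by omega), if_neg (by omega)]; ring

theorem pvGet2_natCast (t : List (List Int)) (x y : Nat) :
    pvGet2 t (x : Int) (y : Int) = (t.getD x []).getD y 0 := by
  simp [pvGet2, PySem.List.pyGetD_natCast]

theorem pvGet2_pvTin_lt (P W i m x y : Nat) (hx : x < i) (hxP : x ≤ P) (hy : y ≤ W) :
    pvGet2 (pvTin P W i m) (x : Int) (y : Int) = pvG x y := by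
  rw [pvGet2_natCast, pvTin, PySem.List.getD_map_range _ _ _ _ (by omega), if_pos hx,
      pvRow, PySem.List.getD_map_range _ _ _ _ (by omega)]

theorem pvSet2_pvTin (P W a m : Nat) (haP : a + 1 ≤ P) (hm : m + 1 ≤ W) :
    pvSet2 (pvTin P W (a+1) m) ((a : Int)+1) ((m : Int)+1) (pvG (a+1) (m+1))
      = pvTin P W (a+1) (m+1) := by
  have h1 : ((a:Int)+1) = ((a+1 : Nat) : Int) := by push_cast; ring
  have h2 : ((m:Int)+1) = ((m+1 : Nat) : Int) := by push_cast; ring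
  rw [h1, h2, pvSet2, PySem.List.pyGetD_natCast, PySem.List.pySetD_natCast, PySem.List.pySetD_natCast]
  unfold pvTin
  rw [PySem.List.getD_map_range _ _ _ _ (by omega), if_neg (by omega), if_pos rfl]
  apply List.ext_getElem (by simp)
  intro k hk hk'
  simp only [List.getElem_set, List.getElem_map, List.getElem_range,
    List.length_set, List.length_map, List.length_range] at *
  by_cases hka : a + 1 = k
  · rw [if_pos hka, ← hka, if_neg (by omega), if_pos rfl]
    apply List.ext_getElem (by simp)
    intro q hq hq'
    simp only [List.getElem_set, List.getElem_map, List.getElem_range,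
      List.length_set, List.length_map, List.length_range] at *
    by_cases hqm : m + 1 = q
    · rw [if_pos hqm, ← hqm, if_pos (by omega)]
    · rw [if_neg hqm]
      by_cases hq2 : q ≤ m
      · rw [if_pos hq2, if_pos (by omega)]
      · rw [if_neg hq2, if_neg (by omega)]
  · rw [if_neg hka]
    by_cases hlt : k < a + 1
    · rw [if_pos hlt, if_pos hlt]
    · rw [if_neg hlt, if_neg hlt, if_neg (by omega), if_neg (by omega)]

theorem pvRow_zero (W a : Nat) :
    (List.range (W+1)).map (fun j => if j ≤ 0 then pvG (a+1) j else 0) = List.replicate (W+1) 0 := by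
  have h : ∀ j ∈ List.range (W+1), (if j ≤ 0 then pvG (a+1) j else 0) = (fun _ : Nat => (0:Int)) j := by
    intro j _
    by_cases hj : j ≤ 0
    · rw [if_pos hj, show j = 0 by omega, pvG, if_neg (by omega)]
    · rw [if_neg hj]
  rw [List.map_congr_left h, List.map_const', List.length_range]

theorem pvRow_full (W i : Nat) :
    (List.range (W+1)).map (fun j => if j ≤ W then pvG i j else 0) = pvRow W i := by
  unfold pvRow
  apply List.map_congr_left
  intro j hj
  rw [if_pos (by simp at hj; omega)]

theorem pvTin_zero (P W a : Nat) : pvTin P W (a+1) 0 = pvT P W a := by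
  unfold pvTin pvT
  apply List.map_congr_left
  intro i' hi'
  split_ifs with h1 h2 h3 h4 <;> try (first | rfl | omega)
  rw [pvRow_zero]

theorem pvTin_last (P W a : Nat) : pvTin P W (a+1) W = pvT P W (a+1) := by
  unfold pvTin pvT
  apply List.map_congr_left
  intro i' hi'
  split_ifs with h1 h2 h3 h4 <;> try (first | rfl | omega)
  rw [h3, pvRow_full]

theorem pv_inner (P W a : Nat) (ha : a < P) :
    ∀ m, m ≤ W →
      (PySem.List.pyRange 1 ((m : Int)+1) 1).foldl (fun t j =>
        if j > ((a:Int)+1) then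
          pvSet2 t ((a:Int)+1) j (pvGet2 t (((a:Int)+1)-1) (j-1) + pvGet2 t (((a:Int)+1)-1) (j-1) + pvGet2 t (((a:Int)+1)-1) (j-2))
        else
          pvSet2 t ((a:Int)+1) j (pvGet2 t (((a:Int)+1)-1) (j-1) + pvGet2 t (((a:Int)+1)-1) (j-1))) (pvTin P W (a+1) 0)
      = pvTin P W (a+1) m := by
  intro m
  induction m with
  | zero => intro _; rw [show ((0:Nat):Int)+1 = 1 by norm_num, PySem.List.pyRange_one_eq_nil (by omega), List.foldl_nil]
  | succ m ih =>
    intro hm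
    rw [show ((m+1:Nat):Int)+1 = ((m:Int)+1)+1 by push_cast; ring,
        PySem.List.pyRange_one_succ_right (by omega), List.foldl_append, ih (by omega),
        List.foldl_cons, List.foldl_nil]
    by_cases h : a < m
    · rw [if_pos (by push_cast; omega),
          show ((a:Int)+1-1) = ((a:Nat):Int) by ring,
          show ((m:Int)+1-1) = ((m:Nat):Int) by ring,
          show ((m:Int)+1-2) = ((m-1:Nat):Int) by omega,
          pvGet2_pvTin_lt P W (a+1) m a m (by omega) (by omega) (by omega),
          pvGet2_pvTin_lt P W (a+1) m a (m-1) (by omega) (by omega) (by omega),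
          ← pvG_rec_gt a m h,
          show ((m:Int)+1) = ((m+1:Nat):Int) by push_cast; ring]
      exact pvSet2_pvTin P W a m (by omega) (by omega)
    · rw [if_neg (by push_cast; omega),
          show ((a:Int)+1-1) = ((a:Nat):Int) by ring,
          show ((m:Int)+1-1) = ((m:Nat):Int) by ring,
          pvGet2_pvTin_lt P W (a+1) m a m (by omega) (by omega) (by omega),
          ← pvG_rec_le a m (by omega),
          show ((m:Int)+1) = ((m+1:Nat):Int) by push_cast; ring]
      exact pvSet2_pvTin P W a m (by omega) (by omega)

theorem pv_outer (P W : Nat) :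
    ∀ n, n ≤ P →
      (PySem.List.pyRange 1 ((n : Int)+1) 1).foldl (fun t i =>
        (PySem.List.pyRange 1 ((W : Int)+1) 1).foldl (fun t j =>
          if j > i then
            pvSet2 t i j (pvGet2 t (i-1) (j-1) + pvGet2 t (i-1) (j-1) + pvGet2 t (i-1) (j-2))
          else
            pvSet2 t i j (pvGet2 t (i-1) (j-1) + pvGet2 t (i-1) (j-1))) t) (pvT P W 0)
      = pvT P W n := by
  intro n
  induction n with
  | zero =>
    intro _
    rw [show ((0:Nat):Int)+1 = 1 by norm_num,
        show PySem.List.pyRange 1 1 1 = ([]:List Int) from PySem.List.pyRange_one_eq_nil (by omega),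
        List.foldl_nil]
  | succ n ih =>
    intro hn
    rw [show ((n+1:Nat):Int)+1 = ((n:Int)+1)+1 by push_cast; ring,
        PySem.List.pyRange_one_succ_right (a := 1) (b := (n:Int)+1) (by omega), List.foldl_append, ih (by omega),
        List.foldl_cons, List.foldl_nil, ← pvTin_zero, ← pvTin_last P W n]
    exact pv_inner P W n (by omega) W (le_refl W)

theorem pv_foldl_fixed {α β : Type} (f : β → α → β) (b : β) (l : List α)
    (h : ∀ x ∈ l, f b x = b) : l.foldl f b = b := by
  induction l with
  | nil => rfl
  | cons x xs ih =>
    rw [List.foldl_cons, h x (by simp)]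
    exact ih (fun y hy => h y (by simp [hy]))

theorem pvRow_zero_build (W : Nat) :
    (List.replicate (W+1) (0:Int)).set 0 1 = pvRow W 0 := by
  apply List.ext_getElem (by simp [pvRow])
  intro q hq hq'
  simp only [List.getElem_set, List.getElem_replicate, pvRow, List.getElem_map, List.getElem_range]
  by_cases hq0 : q = 0
  · subst hq0; simp [pvG]
  · rw [if_neg (by omega), pvG, if_neg (by omega)]

theorem pvT_zero_build (P W : Nat) :
    pvSet2 (List.replicate (P+1) (List.replicate (W+1) 0)) 0 0 1 = pvT P W 0 := by
  rw [pvSet2, PySem.List.pyGetD_zero, PySem.List.pySetD_of_nonneg _ _ (by norm_num),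
      PySem.List.pySetD_of_nonneg _ _ (by norm_num)]
  apply List.ext_getElem (by simp [pvT])
  intro k hk hk'
  simp only [Int.toNat_zero, List.getElem_set, List.getElem_replicate, pvT,
    List.getElem_map, List.getElem_range]
  by_cases hk0 : k = 0
  · subst hk0
    rw [if_pos rfl, if_pos (by omega)]
    simpa using pvRow_zero_build W
  · rw [if_neg (by omega), if_neg (by omega)]

theorem pv_base_fixed (P W : Nat) (x : Int) (hx : 0 ≤ x) :
    pvSet2 (List.replicate (P+1) (List.replicate (W+1) 0)) 0 x 0
      = List.replicate (P+1) (List.replicate (W+1) 0) := by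
  rw [pvSet2, PySem.List.pyGetD_zero, PySem.List.pySetD_of_nonneg _ _ hx,
      PySem.List.pySetD_of_nonneg _ _ (by norm_num)]
  simp [List.set_replicate_self]

theorem pvA_eq (P W : Nat) (h : ¬ ((P:Int) > (W:Int))) :
    list_allocs (P:Int) (W:Int) = pvT P W P := by
  unfold list_allocs
  rw [if_neg h]
  show (PySem.List.pyRange 1 ((P:Int)+1) 1).foldl (fun t i =>
      (PySem.List.pyRange 1 ((W:Int)+1) 1).foldl (fun t j =>
        if j > i then
          pvSet2 t i j (pvGet2 t (i-1) (j-1) + pvGet2 t (i-1) (j-1) + pvGet2 t (i-1) (j-2))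
        else
          pvSet2 t i j (pvGet2 t (i-1) (j-1) + pvGet2 t (i-1) (j-1))) t)
      (pvSet2 ((PySem.List.pyRange 1 ((W:Int)+1) 1).foldl (fun t w => pvSet2 t 0 w 0)
        ((PySem.List.pyRange 0 ((P:Int)+1) 1).map (fun _ =>
          (PySem.List.pyRange 0 ((W:Int)+1) 1).map (fun _ => (0:Int))))) 0 0 1)
    = pvT P W P
  rw [show ((P:Int)+1) = ((P+1:Nat):Int) by push_cast; ring,
      show ((W:Int)+1) = ((W+1:Nat):Int) by push_cast; ring]
  have ht0 : (PySem.List.pyRange 0 ((P+1:Nat):Int) 1).map (fun _ =>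
      (PySem.List.pyRange 0 ((W+1:Nat):Int) 1).map (fun _ => (0:Int)))
      = List.replicate (P+1) (List.replicate (W+1) 0) := by
    rw [PySem.List.pyRange_zero_nat, PySem.List.pyRange_zero_nat, List.map_map, List.map_map]
    simp [List.eq_replicate_iff]
  rw [ht0]
  have ht1 : (PySem.List.pyRange 1 ((W+1:Nat):Int) 1).foldl (fun t w => pvSet2 t 0 w 0)
      (List.replicate (P+1) (List.replicate (W+1) 0))
      = List.replicate (P+1) (List.replicate (W+1) 0) := by
    apply pv_foldl_fixed
    intro x hx
    exact pv_base_fixed P W x (by have := (PySem.List.mem_pyRange_one.mp hx).1; omega)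
  rw [ht1, pvT_zero_build,
      show ((P+1:Nat):Int) = ((P:Int)+1) by push_cast; ring,
      show ((W+1:Nat):Int) = ((W:Int)+1) by push_cast; ring]
  exact pv_outer P W P (le_refl P)

theorem pvRowB (W i : Nat) (hiW : i ≤ W) :
    ∀ m, m ≤ min i (W - i) + 1 →
      (PySem.List.pyRange 0 (m : Int) 1).foldl
        (fun (st : List Int × Int) r =>
          (PySem.List.pySetD st.1 ((i:Int) + r) (st.2 * 2 ^ ((i:Int) - r).toNat),
           PySem.Int.floordiv (st.2 * ((i:Int) - r)) (r + 1)))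
        (PySem.List.pyRepeat [0] ((W:Int) + 1), 1)
      = ((List.range (W+1)).map (fun j => if i ≤ j ∧ j < i + m then pvG i j else 0),
         (i.choose m : Int)) := by
  intro m
  induction m with
  | zero =>
    intro _
    rw [show PySem.List.pyRange 0 ((0:Nat):Int) 1 = [] from PySem.List.pyRange_one_eq_nil (by omega),
        List.foldl_nil]
    rw [PySem.List.pyRepeat_singleton, show ((W:Int)+1).toNat = W + 1 by omega, Nat.choose_zero_right]
    refine Prod.ext ?_ rfl
    have h : ∀ j ∈ List.range (W+1), (fun _ : Nat => (0:Int)) j = (if i ≤ j ∧ j < i + 0 then pvG i j else 0) := by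
      intro j _; rw [if_neg (by omega)]
    show List.replicate (W+1) (0:Int) = _
    rw [← List.map_congr_left h, List.map_const', List.length_range]
  | succ m ih =>
    intro hm
    rw [show ((m+1:Nat):Int) = (m:Int)+1 by push_cast; ring,
        PySem.List.pyRange_one_succ_right (by omega), List.foldl_append, ih (by omega),
        List.foldl_cons, List.foldl_nil]
    have hmi : m ≤ i := by omega
    refine Prod.ext ?_ (by simpa using pvComb_step i m hmi)
    show PySem.List.pySetD _ ((i:Int) + (m:Int)) _ = _
    rw [show (i:Int) + (m:Int) = ((i+m : Nat) : Int) by push_cast; ring,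
        PySem.List.pySetD_natCast]
    apply List.ext_getElem (by simp)
    intro k hk hk'
    simp only [List.getElem_set, List.getElem_map, List.getElem_range, List.length_map,
      List.length_range] at *
    by_cases hkm : i + m = k
    · rw [if_pos hkm, if_pos (by omega), ← hkm, pvG, if_pos ⟨by omega, by omega⟩,
          show i + m - i = m by omega, show ((i:Int) - m).toNat = i - m by omega,
          show 2*i - (i+m) = i - m by omega]
    · rw [if_neg hkm]
      by_cases hg : i ≤ k ∧ k < i + m
      · rw [if_pos hg, if_pos (by omega)]
      · rw [if_neg hg, if_neg (by omega)]

theorem pvRowP_full (W i : Nat) (hiW : i ≤ W) :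
    (List.range (W+1)).map (fun j => if i ≤ j ∧ j < i + (min i (W - i) + 1) then pvG i j else 0)
      = pvRow W i := by
  unfold pvRow
  apply List.map_congr_left
  intro j hj
  simp only [List.mem_range] at hj
  by_cases hg : i ≤ j ∧ j < i + (min i (W - i) + 1)
  · rw [if_pos hg]
  · rw [if_neg hg, pvG, if_neg (by omega)]

theorem pvB_eq (P W : Nat) (h : ¬ ((P:Int) > (W:Int))) :
    list_allocs_alt (P:Int) (W:Int) = pvT P W P := by
  unfold list_allocs_alt
  rw [if_neg h]
  show (PySem.List.pyRange 0 ((P:Int)+1) 1).foldl (fun rows i =>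
      rows ++ [((PySem.List.pyRange 0 (min i ((W:Int) - i) + 1) 1).foldl
        (fun (st : List Int × Int) r =>
          (PySem.List.pySetD st.1 (i + r) (st.2 * 2 ^ (i - r).toNat),
           PySem.Int.floordiv (st.2 * (i - r)) (r + 1)))
        (PySem.List.pyRepeat [0] ((W:Int) + 1), 1)).1]) []
    = pvT P W P
  rw [PySem.List.foldl_append_singleton_eq_map, List.nil_append,
      show ((P:Int)+1) = ((P+1:Nat):Int) by push_cast; ring, PySem.List.pyRange_zero_nat,
      List.map_map]
  unfold pvT
  apply List.map_congr_left
  intro i' hi'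
  simp only [List.mem_range] at hi'
  have hi'W : i' ≤ W := by omega
  rw [Function.comp_apply, if_pos (by omega)]
  have hmin : min ((i':Nat):Int) ((W:Int) - (i':Nat)) + 1 = ((min i' (W - i') + 1 : Nat) : Int) := by
    push_cast [Nat.cast_min]; omega
  rw [hmin, pvRowB W i' hi'W (min i' (W - i') + 1) (le_refl _), ← pvRowP_full W i' hi'W]

-- ===== VERDICT (by name: the statement is the Claim_ definition above) =====
theorem list_allocs_spec : Claim_equal_list_allocs := by
  intro p w _ hpre
  unfold Spec_list_allocs
  by_cases hgt : p > w
  · unfold list_allocs list_allocs_alt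
    rw [if_pos hgt, if_pos hgt]
  · have hp : 0 ≤ p := by
      rcases hpre with h | h
      · omega
      · exact h
    obtain ⟨P, rfl⟩ : ∃ P : Nat, p = (P:Int) := ⟨p.toNat, (Int.toNat_of_nonneg hp).symm⟩
    obtain ⟨W, rfl⟩ : ∃ W : Nat, w = (W:Int) := ⟨w.toNat, (Int.toNat_of_nonneg (by omega)).symm⟩
    rw [pvA_eq P W hgt, pvB_eq P W hgt]
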